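-- pv_equiv track=rewrite | github.com/Bhargav122000/django_projects | projectUtilities/codePackage/moduleNumberConverter.py | convertPlaceValue
-- ===== SOURCE A (Python) =====
-- def convertPlaceValue(number, placeValuesList, placeValue):
-- 	str = ""
-- 	count = 0
-- 	if placeValue == 1000:
-- 		if number >= placeValue:
-- 			count = number // placeValue
-- 			for i in range(count):
-- 				str += placeValuesList[0]
-- 	else:
-- 		if number >= placeValue:
-- 			count = number // placeValue
-- 			if count <= 3:
-- 				for i in range(count):
-- 					str += placeValuesList[0]
-- 			elif count == 4:
-- 				str += placeValuesList[0] + placeValuesList[1]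
-- 			elif count >= 5 and count <= 8:
-- 				str += placeValuesList[1]
-- 				for i in range(count - 5):
-- 					str += placeValuesList[0]
-- 			elif count == 9:
-- 				str += placeValuesList[0] + placeValuesList[2]
-- 	return str
-- ===== SOURCE B (Python) =====
-- def convertPlaceValue(number, placeValuesList, placeValue):
--     if number < placeValue:
--         return ""
--     count = number // placeValue
--     if placeValue == 1000:
--         return placeValuesList[0] * count
--     if count < 0 or count > 9:
--         return ""
--     patterns = ["", "0", "00", "000", "01", "1", "10", "100", "1000", "02"]
--     return "".join(placeValuesList[int(d)] for d in patterns[count])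
-- ===== Notes on version B (the rewrite author's own statement) =====
-- stated objective: simpler
-- what changed: Replaces A's if/elif branch ladder (with three explicit repetition loops) by an early return for number < placeValue, Python's string repetition for the 1000 case, and a single fixed digit->symbol-pattern lookup table indexed by count for the rest.
import Mathlib
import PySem

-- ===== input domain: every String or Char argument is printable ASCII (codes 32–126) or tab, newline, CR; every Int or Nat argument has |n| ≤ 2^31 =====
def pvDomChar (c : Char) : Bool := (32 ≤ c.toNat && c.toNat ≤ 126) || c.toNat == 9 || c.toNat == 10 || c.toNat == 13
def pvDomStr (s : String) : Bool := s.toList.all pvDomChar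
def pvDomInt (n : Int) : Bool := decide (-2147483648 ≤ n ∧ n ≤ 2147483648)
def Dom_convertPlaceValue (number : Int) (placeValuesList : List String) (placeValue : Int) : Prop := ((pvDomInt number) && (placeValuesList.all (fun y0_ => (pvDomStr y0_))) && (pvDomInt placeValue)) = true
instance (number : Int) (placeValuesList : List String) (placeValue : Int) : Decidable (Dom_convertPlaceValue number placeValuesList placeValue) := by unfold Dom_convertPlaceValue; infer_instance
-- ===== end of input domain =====

-- B replaces A's if/elif ladder over the digit count by a fixed digit→symbol-pattern table
-- indexed by count (objective: simpler); same return value wherever A returns.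

-- ===== PORT A =====
def convertPlaceValue (number : Int) (placeValuesList : List String) (placeValue : Int) : String :=
  let str : String := ""
  if placeValue = 1000 then
    if number ≥ placeValue then
      let count := PySem.Int.floordiv number placeValue
      (PySem.List.pyRange 0 count 1).foldl
        (fun s _ => s ++ PySem.List.pyGetD placeValuesList 0 "") str
    else str
  else
    if number ≥ placeValue then
      let count := PySem.Int.floordiv number placeValue
      if count ≤ 3 then
        (PySem.List.pyRange 0 count 1).foldl
          (fun s _ => s ++ PySem.List.pyGetD placeValuesList 0 "") str
      else if count = 4 then
        str ++ (PySem.List.pyGetD placeValuesList 0 "" ++ PySem.List.pyGetD placeValuesList 1 "")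
      else if 5 ≤ count ∧ count ≤ 8 then
        (PySem.List.pyRange 0 (count - 5) 1).foldl
          (fun s _ => s ++ PySem.List.pyGetD placeValuesList 0 "")
          (str ++ PySem.List.pyGetD placeValuesList 1 "")
      else if count = 9 then
        str ++ (PySem.List.pyGetD placeValuesList 0 "" ++ PySem.List.pyGetD placeValuesList 2 "")
      else str
    else str

-- ===== PORT B =====
-- Python's `s * count` (count ≥ 0 here): repeated concatenation.
def pvStrMul (s : String) : Nat → String
  | 0 => ""
  | n + 1 => s ++ pvStrMul s n

-- Source B's digit strings "0","00",…,"02" ported as lists of the symbol indices int(d) reads off.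
def pvPatterns : List (List Int) :=
  [[], [0], [0, 0], [0, 0, 0], [0, 1], [1], [1, 0], [1, 0, 0], [1, 0, 0, 0], [0, 2]]

def convertPlaceValue_alt (number : Int) (placeValuesList : List String) (placeValue : Int) : String :=
  if number < placeValue then ""
  else
    let count := PySem.Int.floordiv number placeValue
    if placeValue = 1000 then
      pvStrMul (PySem.List.pyGetD placeValuesList 0 "") count.toNat
    else if count < 0 ∨ 9 < count then ""
    else
      (PySem.List.pyGetD pvPatterns count []).foldl
        (fun s i => s ++ PySem.List.pyGetD placeValuesList i "") ""

-- ===== PRECONDITION & SPEC =====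
-- Pre_ excludes exactly the inputs where A raises: ZeroDivisionError (placeValue = 0 with
-- number ≥ placeValue) and IndexError (placeValuesList too short for the symbols the reached
-- branch indexes). B raises on exactly the same inputs.
def Pre_convertPlaceValue (number : Int) (placeValuesList : List String) (placeValue : Int) : Prop :=
  number < placeValue ∨
    (placeValue ≠ 0 ∧
      (let c := PySem.Int.floordiv number placeValue
       if placeValue = 1000 then 1 ≤ placeValuesList.length
       else if c ≤ 0 then True
       else if c ≤ 3 then 1 ≤ placeValuesList.length
       else if c ≤ 8 then 2 ≤ placeValuesList.length
       else if c = 9 then 3 ≤ placeValuesList.length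
       else True))
instance (number : Int) (placeValuesList : List String) (placeValue : Int) : Decidable (Pre_convertPlaceValue number placeValuesList placeValue) := by unfold Pre_convertPlaceValue; infer_instance

def pvWitness_convertPlaceValue : Int × List String × Int := (1953, ["M"], 1000)

def Spec_convertPlaceValue (number : Int) (placeValuesList : List String) (placeValue : Int) (out : String) : Prop := out = convertPlaceValue_alt number placeValuesList placeValue
instance (number : Int) (placeValuesList : List String) (placeValue : Int) (out : String) : Decidable (Spec_convertPlaceValue number placeValuesList placeValue out) := by unfold Spec_convertPlaceValue; infer_instance

-- ===== CLAIM (what is proved, stated in full; the proofs are below) =====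
def Claim_equal_convertPlaceValue : Prop := ∀ (number : Int) (placeValuesList : List String) (placeValue : Int), Dom_convertPlaceValue number placeValuesList placeValue → Pre_convertPlaceValue number placeValuesList placeValue → Spec_convertPlaceValue number placeValuesList placeValue (convertPlaceValue number placeValuesList placeValue)

-- ===== LEMMAS AND PROOFS =====

-- A's `for i in range(count): str += x` is x repeated count times, appended to the initial string.
theorem pvFoldl_append_const (x : String) (l : List Int) (init : String) :
    l.foldl (fun s _ => s ++ x) init = init ++ pvStrMul x l.length := by
  induction l generalizing init with
  | nil => simp [pvStrMul]
  | cons a t ih => simp [List.foldl, ih, pvStrMul, String.append_assoc]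

-- ===== VERDICT (by name: the statement is the Claim_ definition above) =====
theorem convertPlaceValue_spec : Claim_equal_convertPlaceValue := by
  intro number l pv _ hpre
  unfold Spec_convertPlaceValue convertPlaceValue convertPlaceValue_alt
  dsimp only
  by_cases h1 : pv = 1000
  · subst h1
    by_cases h2 : number ≥ (1000 : Int)
    · rw [if_pos rfl, if_pos h2, if_neg (show ¬ number < 1000 from by omega), if_pos rfl,
        pvFoldl_append_const]
      simp [PySem.List.length_pyRange_one]
    · rw [if_pos rfl, if_neg h2, if_pos (show number < 1000 from by omega)]
  · by_cases h2 : number ≥ pv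
    · have hnl : ¬ number < pv := by omega
      rcases hpre with hlt | -
      · omega
      · obtain ⟨c, hc⟩ : ∃ c, PySem.Int.floordiv number pv = c := ⟨_, rfl⟩
        rw [if_neg h1, if_pos h2, if_neg hnl, if_neg h1, hc]
        by_cases hneg : c < 0
        · rw [if_pos (show c ≤ 3 by omega), PySem.List.pyRange_one_eq_nil (by omega),
            if_pos (Or.inl hneg)]
          rfl
        · by_cases hbig : 9 < c
          · rw [if_neg (show ¬ c ≤ 3 by omega), if_neg (show ¬ c = 4 by omega),
              if_neg (show ¬ (5 ≤ c ∧ c ≤ 8) by omega), if_neg (show ¬ c = 9 by omega),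
              if_pos (Or.inr hbig)]
          · have h0 : 0 ≤ c := by omega
            have h9 : c ≤ 9 := by omega
            rw [if_neg (show ¬ (c < 0 ∨ 9 < c) by omega)]
            interval_cases c
            · rw [if_pos (by norm_num), (by decide : PySem.List.pyRange (0:Int) 0 1 = []),
                (by decide : PySem.List.pyGetD pvPatterns (0:Int) [] = [])]
              rfl
            · rw [if_pos (by norm_num), (by decide : PySem.List.pyRange (0:Int) 1 1 = [0]),
                (by decide : PySem.List.pyGetD pvPatterns (1:Int) [] = [0])]
              simp [List.foldl]
            · rw [if_pos (by norm_num), (by decide : PySem.List.pyRange (0:Int) 2 1 = [0, 1]),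
                (by decide : PySem.List.pyGetD pvPatterns (2:Int) [] = [0, 0])]
              simp [List.foldl]
            · rw [if_pos (by norm_num), (by decide : PySem.List.pyRange (0:Int) 3 1 = [0, 1, 2]),
                (by decide : PySem.List.pyGetD pvPatterns (3:Int) [] = [0, 0, 0])]
              simp [List.foldl]
            · rw [if_neg (by norm_num), if_pos rfl,
                (by decide : PySem.List.pyGetD pvPatterns (4:Int) [] = [0, 1])]
              simp [List.foldl]
            · rw [if_neg (by norm_num), if_neg (by norm_num), if_pos (by norm_num),
                (by decide : PySem.List.pyRange (0:Int) (5 - 5) 1 = []),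
                (by decide : PySem.List.pyGetD pvPatterns (5:Int) [] = [1])]
              simp [List.foldl]
            · rw [if_neg (by norm_num), if_neg (by norm_num), if_pos (by norm_num),
                (by decide : PySem.List.pyRange (0:Int) (6 - 5) 1 = [0]),
                (by decide : PySem.List.pyGetD pvPatterns (6:Int) [] = [1, 0])]
              simp [List.foldl]
            · rw [if_neg (by norm_num), if_neg (by norm_num), if_pos (by norm_num),
                (by decide : PySem.List.pyRange (0:Int) (7 - 5) 1 = [0, 1]),
                (by decide : PySem.List.pyGetD pvPatterns (7:Int) [] = [1, 0, 0])]
              simp [List.foldl]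
            · rw [if_neg (by norm_num), if_neg (by norm_num), if_pos (by norm_num),
                (by decide : PySem.List.pyRange (0:Int) (8 - 5) 1 = [0, 1, 2]),
                (by decide : PySem.List.pyGetD pvPatterns (8:Int) [] = [1, 0, 0, 0])]
              simp [List.foldl]
            · rw [if_neg (by norm_num), if_neg (by norm_num), if_neg (by norm_num),
                if_pos rfl, (by decide : PySem.List.pyGetD pvPatterns (9:Int) [] = [0, 2])]
              simp [List.foldl]
    · rw [if_neg h1, if_neg h2, if_pos (show number < pv from by omega)]
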